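-- pv_equiv track=rewrite | github.com/DrewKimball/Heighway-Dragon | main.py | get_pos
-- ===== SOURCE A (Python) =====
-- def calc_sum(array):
--     bin_arr = []
--     sum = 0
--     if len(array) > 0:
--         bin_arr.append('0')
--     for n in array:
--         while n >= len(bin_arr):
--             bin_arr.append('0')
--         if bin_arr[n] == '1':
--             bin_arr[n] = '0'
--             bin_arr.append('1')
--         else:
--             bin_arr[n] = '1'
--     if len(bin_arr) > 0:
--         sum = int(''.join(bin_arr[::-1]), 2)
--     return sum
--
-- def calc_final_pos(p_pos, n_pos):
--     p_pos[0] = p_pos[0][::-1]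
--     p_pos[1] = p_pos[1][::-1]
--     n_pos[0] = n_pos[0][::-1]
--     n_pos[1] = n_pos[1][::-1]
--     pos = [0, 0]
--     pos[0] = calc_sum(p_pos[0]) - calc_sum(n_pos[0])
--     pos[1] = calc_sum(p_pos[1]) - calc_sum(n_pos[1])
--     return pos
--
-- def find_n(m, p_pos, n_pos, polarity):
--     n = m - 1
--     x = n // 2
--     theta = n % 8
--     x_p = polarity
--     y_p = polarity
--     if 5 <= theta <= 7:
--         x_p *= -1
--     if 3 <= theta <= 5:
--         y_p *= -1
--     if n % 2 == 1:
--         if x_p == 1: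
--             p_pos[0].append(x)
--         else:
--             n_pos[0].append(x)
--         if y_p == 1:
--             p_pos[1].append(x)
--         else:
--             n_pos[1].append(x)
--     elif n % 4 == 0:
--         if y_p == 1:
--             p_pos[1].append(x)
--         else:
--             n_pos[1].append(x)
--     elif n % 2 == 0:
--         if x_p == 1:
--             p_pos[0].append(x)
--         else:
--             n_pos[0].append(x)
--
-- def get_pos(bin_m):
--     chunk_sign = 1
--     bit_sign = 1
--     flip = False
--     size = len(bin_m)
--     p_pos = [[], []]
--     n_pos = [[], []]
--     for i in range(size):
--         if bin_m[i] == '1':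
--             if i > 0 and bin_m[i-1] == '0':
--                 chunk_sign *= -1
--                 bit_sign = 1
--                 flip = True
--             polarity = chunk_sign * bit_sign
--             find_n(size - i, p_pos, n_pos, polarity)
--             if flip:
--                 bit_sign = -1
--                 flip = False
--             if i == 0:
--                 bit_sign = -1
--     return calc_final_pos(p_pos, n_pos)
-- ===== SOURCE B (Python) =====
-- def get_pos(bin_m):
--     # Signed integer accumulators replace A's bit-index lists + binary-adder simulation.
--     chunk_sign = 1
--     bit_sign = 1
--     flip = False
--     size = len(bin_m)
--     x_acc = 0
--     y_acc = 0
--     for i, c in enumerate(bin_m):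
--         if c == '1':
--             if i > 0 and bin_m[i - 1] == '0':
--                 chunk_sign = -chunk_sign
--                 bit_sign = 1
--                 flip = True
--             polarity = chunk_sign * bit_sign
--             n = size - i - 1
--             v = polarity << (n // 2)
--             theta = n % 8
--             x_v = -v if 5 <= theta <= 7 else v
--             y_v = -v if 3 <= theta <= 5 else v
--             if n % 2 == 1:
--                 x_acc += x_v
--                 y_acc += y_v
--             elif n % 4 == 0:
--                 y_acc += y_v
--             else:
--                 x_acc += x_v
--             if flip:
--                 bit_sign = -1
--                 flip = False
--             if i == 0:
--                 bit_sign = -1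
--     return [x_acc, y_acc]
-- ===== Notes on version B (the rewrite author's own statement) =====
-- stated objective: simpler
-- what changed: B drops calc_sum's binary-adder char-array simulation, the four bit-index lists and the final reversals entirely: the same driver loop adds signed powers of two (polarity * 2**(n//2)) into two integer accumulators and returns them directly.
import Mathlib
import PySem

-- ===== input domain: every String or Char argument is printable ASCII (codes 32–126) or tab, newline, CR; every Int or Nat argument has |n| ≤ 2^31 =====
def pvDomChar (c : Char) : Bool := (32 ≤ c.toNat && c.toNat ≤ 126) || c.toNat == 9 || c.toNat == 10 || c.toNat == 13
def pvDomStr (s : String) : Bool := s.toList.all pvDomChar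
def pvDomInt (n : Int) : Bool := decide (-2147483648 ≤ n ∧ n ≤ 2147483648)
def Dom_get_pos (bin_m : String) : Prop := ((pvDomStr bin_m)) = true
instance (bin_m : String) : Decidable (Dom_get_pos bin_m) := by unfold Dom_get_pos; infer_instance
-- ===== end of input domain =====

-- B replaces A's bit-index lists and binary-adder simulation by four-into-two signed
-- integer accumulators updated in the same driver loop (objective: simpler).

-- ===== PORT A =====

-- 'while n >= len(bin_arr): bin_arr.append('0')' — structural recursion on a fuel that
-- bounds the number of iterations (the guard itself is unchanged)
def padGo (fuel : Nat) (n : Int) (ba : List Char) : List Char :=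
  match fuel with
  | 0 => ba
  | fuel + 1 => if (ba.length : Int) ≤ n then padGo fuel n (ba ++ ['0']) else ba

def padLoop (n : Int) (ba : List Char) : List Char :=
  padGo (n + 1 - ba.length).toNat n ba

-- the body of calc_sum's 'for n in array' loop
def calcStep (ba : List Char) (n : Int) : List Char :=
  let ba2 := padLoop n ba
  if PySem.List.pyGetD ba2 n ' ' = '1' then PySem.List.pySetD ba2 n '0' ++ ['1']
  else PySem.List.pySetD ba2 n '1'

def calc_sum (array : List Int) : Int :=
  let ba0 : List Char := if array.length > 0 then ['0'] else []
  let ba := array.foldl calcStep ba0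
  -- int(''.join(bin_arr[::-1]), 2): [::-1] is reversal (PySem.List.slice?_none_none_neg_one);
  -- int(s, 2) is ported by hand as the standard base-2 digit fold — exact here because
  -- bin_arr only ever holds '0'/'1' (PySem.Int.ofCharsBase? agrees on such strings)
  if ba.length > 0 then ba.reverse.foldl (fun acc c => acc * 2 + (if c = '1' then 1 else 0)) 0
  else 0

def find_n (m : Int) (p_pos n_pos : List Int × List Int) (polarity : Int) :
    (List Int × List Int) × (List Int × List Int) :=
  let n := m - 1
  let x := PySem.Int.floordiv n 2
  let theta := PySem.Int.mod n 8
  let x_p := if 5 ≤ theta ∧ theta ≤ 7 then polarity * -1 else polarity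
  let y_p := if 3 ≤ theta ∧ theta ≤ 5 then polarity * -1 else polarity
  if PySem.Int.mod n 2 = 1 then
    let pn := if x_p = 1 then ((p_pos.1 ++ [x], p_pos.2), n_pos) else (p_pos, (n_pos.1 ++ [x], n_pos.2))
    if y_p = 1 then ((pn.1.1, pn.1.2 ++ [x]), pn.2) else (pn.1, (pn.2.1, pn.2.2 ++ [x]))
  else if PySem.Int.mod n 4 = 0 then
    if y_p = 1 then ((p_pos.1, p_pos.2 ++ [x]), n_pos) else (p_pos, (n_pos.1, n_pos.2 ++ [x]))
  else if PySem.Int.mod n 2 = 0 then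
    if x_p = 1 then ((p_pos.1 ++ [x], p_pos.2), n_pos) else (p_pos, (n_pos.1 ++ [x], n_pos.2))
  else (p_pos, n_pos)

def calc_final_pos (p_pos n_pos : List Int × List Int) : List Int :=
  -- the four '[::-1]' reversals (PySem.List.slice?_none_none_neg_one)
  let p0 := p_pos.1.reverse
  let p1 := p_pos.2.reverse
  let n0 := n_pos.1.reverse
  let n1 := n_pos.2.reverse
  [calc_sum p0 - calc_sum n0, calc_sum p1 - calc_sum n1]

-- the body of get_pos's 'for i in range(size)' loop, hoisted to a named helper
def stepA (cs : List Char) (size : Int)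
    (st : Int × Int × Bool × (List Int × List Int) × (List Int × List Int)) (i : Int) :
    Int × Int × Bool × (List Int × List Int) × (List Int × List Int) :=
  let (chunk_sign, bit_sign, flip, p_pos, n_pos) := st
  if PySem.List.pyGetD cs i ' ' = '1' then
    let cbf :=
      if 0 < i ∧ PySem.List.pyGetD cs (i - 1) ' ' = '0' then (chunk_sign * -1, (1 : Int), true)
      else (chunk_sign, bit_sign, flip)
    let polarity := cbf.1 * cbf.2.1
    let pn := find_n (size - i) p_pos n_pos polarity
    let bf := if cbf.2.2 then ((-1 : Int), false) else (cbf.2.1, cbf.2.2)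
    let bit_sign := if i = 0 then (-1 : Int) else bf.1
    (cbf.1, bit_sign, bf.2, pn.1, pn.2)
  else st

def get_pos (bin_m : String) : List Int :=
  let cs := bin_m.toList
  let size : Int := PySem.Str.len bin_m
  let st := (PySem.List.pyRange 0 size 1).foldl (stepA cs size)
    ((1 : Int), (1 : Int), false, (([] : List Int), ([] : List Int)), (([] : List Int), ([] : List Int)))
  calc_final_pos st.2.2.2.1 st.2.2.2.2

-- ===== PORT B =====

-- the body of B's 'for i, c in enumerate(bin_m)' loop, hoisted to a named helper
def stepB (cs : List Char) (size : Int)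
    (st : Int × Int × Bool × Int × Int) (ic : Int × Char) :
    Int × Int × Bool × Int × Int :=
  let (chunk_sign, bit_sign, flip, x_acc, y_acc) := st
  let i := ic.1
  if ic.2 = '1' then
    let cbf :=
      if 0 < i ∧ PySem.List.pyGetD cs (i - 1) ' ' = '0' then (-chunk_sign, (1 : Int), true)
      else (chunk_sign, bit_sign, flip)
    let polarity := cbf.1 * cbf.2.1
    let n := size - i - 1
    -- v = polarity * 2 ** (n // 2); n ≥ 0 inside the loop, so .toNat is exact
    let v := polarity * 2 ^ ((PySem.Int.floordiv n 2).toNat)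
    let theta := PySem.Int.mod n 8
    let x_v := if 5 ≤ theta ∧ theta ≤ 7 then -v else v
    let y_v := if 3 ≤ theta ∧ theta ≤ 5 then -v else v
    let acc :=
      if PySem.Int.mod n 2 = 1 then (x_acc + x_v, y_acc + y_v)
      else if PySem.Int.mod n 4 = 0 then (x_acc, y_acc + y_v)
      else (x_acc + x_v, y_acc)
    let bf := if cbf.2.2 then ((-1 : Int), false) else (cbf.2.1, cbf.2.2)
    let bit_sign := if i = 0 then (-1 : Int) else bf.1
    (cbf.1, bit_sign, bf.2, acc.1, acc.2)
  else st

def get_pos_alt (bin_m : String) : List Int :=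
  let cs := bin_m.toList
  let size : Int := PySem.Str.len bin_m
  let st := (PySem.List.enumerate cs 0).foldl (stepB cs size) ((1 : Int), (1 : Int), false, (0 : Int), (0 : Int))
  [st.2.2.2.1, st.2.2.2.2]

-- ===== PRECONDITION & SPEC =====
def Spec_get_pos (bin_m : String) (out : List Int) : Prop := out = get_pos_alt bin_m
instance (bin_m : String) (out : List Int) : Decidable (Spec_get_pos bin_m out) := by unfold Spec_get_pos; infer_instance

-- ===== CLAIM (what is proved, stated in full; the proofs are below) =====
def Claim_equal_get_pos : Prop := ∀ (bin_m : String), Dom_get_pos bin_m → Spec_get_pos bin_m (get_pos bin_m)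

-- ===== LEMMAS AND PROOFS =====

-- value of an LSB-first list of binary digit characters
def bitv (c : Char) : Int := if c = '1' then 1 else 0

def valC : List Char → Int
  | [] => 0
  | c :: cs => bitv c + 2 * valC cs

-- 2^x for a nonnegative Int x, and the sum A's calc_sum computes for a list of exponents
def Spow (x : Int) : Int := 2 ^ x.toNat

def Ssum (l : List Int) : Int := (l.map Spow).sum

theorem Ssum_nil : Ssum [] = 0 := rfl

theorem Ssum_append (l : List Int) (x : Int) : Ssum (l ++ [x]) = Ssum l + Spow x := by
  simp [Ssum]

theorem valC_append (xs ys : List Char) :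
    valC (xs ++ ys) = valC xs + 2 ^ xs.length * valC ys := by
  induction xs with
  | nil => simp [valC]
  | cons c cs ih => simp [valC, ih, pow_succ]; ring

theorem valC_replicate (k : Nat) : valC (List.replicate k '0') = 0 := by
  induction k with
  | zero => rfl
  | succ k ih => simp [List.replicate_succ, valC, ih, bitv]

theorem conv_foldl (ba : List Char) : ∀ acc : Int,
    ba.reverse.foldl (fun acc c => acc * 2 + (if c = '1' then 1 else 0)) acc
      = acc * 2 ^ ba.length + valC ba := by
  induction ba with
  | nil => intro acc; simp [valC]
  | cons c cs ih =>
    intro acc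
    simp only [List.reverse_cons, List.foldl_append, List.foldl_cons, List.foldl_nil, ih,
      valC, List.length_cons, bitv]
    ring

theorem padGo_eq (fuel : Nat) : ∀ (n : Int) (ba : List Char),
    (n + 1 - (ba.length : Int)).toNat ≤ fuel →
    padGo fuel n ba = ba ++ List.replicate ((n + 1).toNat - ba.length) '0' := by
  induction fuel with
  | zero =>
    intro n ba h
    have : (n + 1).toNat - ba.length = 0 := by omega
    simp [padGo, this]
  | succ fuel ih =>
    intro n ba h
    by_cases hle : (ba.length : Int) ≤ n
    · have h1 : ((n + 1 - ((ba ++ ['0']).length : Int)).toNat) ≤ fuel := by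
        simp only [List.length_append, List.length_singleton]; omega
      have h2 : (n + 1).toNat - ba.length = ((n + 1).toNat - (ba ++ ['0']).length) + 1 := by
        simp only [List.length_append, List.length_singleton]; omega
      simp only [padGo, if_pos hle, ih n (ba ++ ['0']) h1, h2]
      simp [List.replicate_succ, List.append_assoc]
    · have h2 : (n + 1).toNat - ba.length = 0 := by omega
      simp [padGo, hle, h2]

theorem padLoop_eq (n : Int) (ba : List Char) :
    padLoop n ba = ba ++ List.replicate ((n + 1).toNat - ba.length) '0' :=
  padGo_eq _ n ba (by omega)

theorem valC_set (ba : List Char) : ∀ (i : Nat) (c : Char) (h : i < ba.length),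
    valC (ba.set i c) = valC ba + 2 ^ i * (bitv c - bitv ba[i]) := by
  induction ba with
  | nil => intro i c h; simp at h
  | cons b bs ih =>
    intro i c h
    cases i with
    | zero => simp [valC]; ring
    | succ i =>
      have h' : i < bs.length := by simpa using h
      simp [valC, ih i c h', pow_succ]
      ring

-- the two shapes of calc_sum's working array after processing a nonempty prefix whose
-- maximum is m: "top bit at m" and "top bit at m+1"
def StA (m : Nat) (ba : List Char) : Prop := ba.length = m + 1 ∧ ba[m]? = some '1'

def StC (m : Nat) (ba : List Char) : Prop := ba.length = m + 2 ∧ ba[m + 1]? = some '1'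

theorem calcStep_natCast (ba : List Char) (X : Nat) :
    calcStep ba (X : Int) =
      (let P := ba ++ List.replicate (X + 1 - ba.length) '0'
       if P.getD X ' ' = '1' then P.set X '0' ++ ['1'] else P.set X '1') := by
  have h1 : ((X : Int) + 1).toNat = X + 1 := by omega
  simp only [calcStep, padLoop_eq, h1, PySem.List.pyGetD_natCast, PySem.List.pySetD_natCast]

-- the carry branch taken from a state whose top bit sits at index X (so the array is
-- exactly X+1 long): value gains 2^X, the new top bit sits at X+1, and index X reads '0'
theorem carry_branch (ba : List Char) (X : Nat) (hL : ba.length = X + 1)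
    (hget : ba[X]? = some '1') :
    valC (ba.set X '0' ++ ['1']) = valC ba + 2 ^ X ∧
    StC X (ba.set X '0' ++ ['1']) ∧ (ba.set X '0' ++ ['1'])[X]? = some '0' := by
  have hx : X < ba.length := by omega
  have hbaX : ba[X] = '1' := by
    have h2 := List.getElem?_eq_getElem hx
    rw [hget] at h2; exact (Option.some_inj.mp h2).symm
  refine ⟨?_, ⟨?_, ?_⟩, ?_⟩
  · rw [valC_append, valC_set ba X '0' hx, hbaX]
    simp [valC, bitv, hL, pow_succ]; ring
  · simp [hL]
  · rw [List.getElem?_append_right (by simp [hL])]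
    simp [hL]
  · rw [List.getElem?_append_left (by simp; omega)]
    exact List.getElem?_set_self (by omega)

-- one calc_sum step from a valid state: the value grows by 2^X and the state stays valid
theorem calcStep_spec (m X : Nat) (ba : List Char)
    (hst : StA m ba ∨ StC m ba) (hmX : m ≤ X)
    (hok : X = m → StA m ba ∨ ba[m]? = some '0') :
    valC (calcStep ba (X : Int)) = valC ba + 2 ^ X ∧
    (StA X (calcStep ba (X : Int)) ∨ StC X (calcStep ba (X : Int))) ∧
    (m < X → StA X (calcStep ba (X : Int)) ∨ (calcStep ba (X : Int))[X]? = some '0') := by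
  rw [calcStep_natCast]
  by_cases hXm : X = m
  · subst hXm
    rcases hst with hA | hC
    · -- top bit at X: carry
      obtain ⟨hL, hget⟩ := hA
      have hpad : X + 1 - ba.length = 0 := by omega
      simp only [hpad, List.replicate_zero, List.append_nil]
      have hgetD : ba.getD X ' ' = '1' := by
        rw [List.getD_eq_getElem?_getD, hget]; rfl
      rw [if_pos hgetD]
      obtain ⟨hv, hs, _⟩ := carry_branch ba X hL hget
      exact ⟨hv, Or.inr hs, fun h => absurd h (by omega)⟩
    · -- top bit at X+1 and (from hok) bit X clear: plain set
      obtain ⟨hL, htop⟩ := hC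
      have hb0 : ba[X]? = some '0' := by
        rcases hok rfl with hA | h0
        · exact absurd hA.1 (by omega)
        · exact h0
      have hx : X < ba.length := by omega
      have hbaX : ba[X] = '0' := by
        have h2 := List.getElem?_eq_getElem hx
        rw [hb0] at h2; exact (Option.some_inj.mp h2).symm
      have hpad : X + 1 - ba.length = 0 := by omega
      simp only [hpad, List.replicate_zero, List.append_nil]
      have hgetD : ba.getD X ' ' = '0' := by
        rw [List.getD_eq_getElem?_getD, hb0]; rfl
      rw [if_neg (by rw [List.getD_eq_getElem?_getD, hb0]; decide)]
      refine ⟨?_, Or.inr ⟨?_, ?_⟩, fun h => absurd h (by omega)⟩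
      · rw [valC_set ba X '1' hx, hbaX]; simp [bitv]
      · simp [hL]
      · rw [List.getElem?_set_ne (by omega)]; exact htop
  · have hmX' : m < X := lt_of_le_of_ne hmX (Ne.symm hXm)
    by_cases hlen : ba.length ≤ X
    · -- padding reaches X, which therefore reads '0': plain set, top bit now at X
      set P := ba ++ List.replicate (X + 1 - ba.length) '0' with hP
      have hPlen : P.length = X + 1 := by simp [hP]; omega
      have hPX : P[X]? = some '0' := by
        rw [hP, List.getElem?_append_right hlen, List.getElem?_replicate]
        simp; omega
      have hPXe : P[X]'(by omega) = '0' := by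
        have h2 := List.getElem?_eq_getElem (show X < P.length by omega)
        rw [hPX] at h2; exact (Option.some_inj.mp h2).symm
      have hgetD : P.getD X ' ' = '0' := by
        rw [List.getD_eq_getElem?_getD, hPX]; rfl
      rw [if_neg (by rw [List.getD_eq_getElem?_getD, hPX]; decide)]
      have hvP : valC P = valC ba := by
        rw [hP, valC_append, valC_replicate]; ring
      refine ⟨?_, Or.inl ⟨?_, ?_⟩, fun _ => Or.inl ⟨?_, ?_⟩⟩
      · rw [valC_set P X '1' (by omega), hPXe, hvP]; simp [bitv]
      · simp [hPlen]
      · exact List.getElem?_set_self (by omega)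
      · simp [hPlen]
      · exact List.getElem?_set_self (by omega)
    · -- no padding and bit X already set (top bit of a StC state with X = m+1): carry
      have hC : StC m ba := by
        rcases hst with hA | hC
        · exact absurd hA.1 (by omega)
        · exact hC
      obtain ⟨hL, htop⟩ := hC
      have hXm1 : X = m + 1 := by omega
      have hget : ba[X]? = some '1' := by rw [hXm1]; exact htop
      have hpad : X + 1 - ba.length = 0 := by omega
      simp only [hpad, List.replicate_zero, List.append_nil]
      have hgetD : ba.getD X ' ' = '1' := by
        rw [List.getD_eq_getElem?_getD, hget]; rfl
      rw [if_pos hgetD]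
      obtain ⟨hv, hs, h0⟩ := carry_branch ba X (by omega) hget
      exact ⟨hv, Or.inr hs, fun _ => Or.inr h0⟩

theorem length_calcStep (ba : List Char) (n : Int) : ba.length ≤ (calcStep ba n).length := by
  have hpad : ba.length ≤ (padLoop n ba).length := by
    rw [padLoop_eq]; simp
  by_cases h : PySem.List.pyGetD (padLoop n ba) n ' ' = '1' <;>
    simp [calcStep, h, PySem.List.length_pySetD] <;> omega

theorem length_foldl_calcStep (l : List Int) : ∀ ba : List Char,
    ba.length ≤ (l.foldl calcStep ba).length := by
  induction l with
  | nil => intro ba; simp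
  | cons x rest ih =>
    intro ba
    exact le_trans (length_calcStep ba x) (by simpa using ih (calcStep ba x))

-- running calc_sum's loop over a nondecreasing list with each value at most twice
theorem calc_run (l : List Int) : ∀ (m : Nat) (ba : List Char),
    l.Pairwise (· ≤ ·) → (∀ x ∈ l, (m : Int) ≤ x) → (∀ y ∈ l, l.count y ≤ 2) →
    (StA m ba ∨ StC m ba) → ((m : Int) ∈ l → StA m ba ∨ ba[m]? = some '0') →
    l.count (m : Int) ≤ 1 →
    valC (l.foldl calcStep ba) = valC ba + Ssum l := by
  induction l with
  | nil => intro m ba _ _ _ _ _ _; simp [Ssum_nil]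
  | cons x rest ih =>
    intro m ba hp hge hcnt hst hok hc1
    have hx0 : (m : Int) ≤ x := hge x (by simp)
    have hxX : x = (x.toNat : Int) := by omega
    set X := x.toNat with hXdef
    have hmX : m ≤ X := by omega
    obtain ⟨hv, hst', hpost⟩ :=
      calcStep_spec m X ba hst hmX (fun hEq => hok (by rw [hxX, hEq]; simp))
    have hcons := List.pairwise_cons.mp hp
    have hrest : valC (rest.foldl calcStep (calcStep ba (X : Int))) =
        valC (calcStep ba (X : Int)) + Ssum rest := by
      apply ih X (calcStep ba (X : Int)) hcons.2
      · intro z hz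
        have := hcons.1 z hz; omega
      · intro y hy
        have h2 := hcnt y (by simp [hy])
        rw [List.count_cons] at h2; omega
      · exact hst'
      · intro hmem
        by_cases hXm : m = X
        · exfalso
          have hxm : x = (m : Int) := by omega
          rw [List.count_cons, if_pos (by simp [hxm])] at hc1
          have h0 : rest.count ((X : Nat) : Int) = 0 := by rw [← hXm]; omega
          exact (List.count_eq_zero.mp h0) hmem
        · exact hpost (by omega)
      · by_cases hXm : m = X
        · have hxm : x = (m : Int) := by omega
          rw [List.count_cons, if_pos (by simp [hxm])] at hc1
          rw [← hXm]; omega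
        · have h2 := hcnt x (by simp)
          rw [List.count_cons, if_pos (by simp)] at h2
          rw [← hxX]; omega
    simp only [List.foldl_cons]
    rw [hxX, hrest, hv]
    simp only [Ssum, List.map_cons, List.sum_cons, Spow, Int.toNat_natCast]
    ring

theorem calcStep_first (X : Nat) :
    valC (calcStep ['0'] (X : Int)) = 2 ^ X ∧ StA X (calcStep ['0'] (X : Int)) := by
  rw [calcStep_natCast]
  have hP : (['0'] ++ List.replicate (X + 1 - List.length ['0']) '0') = List.replicate (X + 1) '0' := by
    simp [List.replicate_succ]
  simp only [hP]
  have hPX : (List.replicate (X + 1) '0')[X]? = some '0' := by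
    rw [List.getElem?_replicate]; simp
  have hPXe : (List.replicate (X + 1) '0')[X]'(by simp) = '0' := by
    simp
  rw [if_neg (by rw [List.getD_eq_getElem?_getD, hPX]; decide)]
  refine ⟨?_, ?_, ?_⟩
  · rw [valC_set _ X '1' (by simp)]
    simp [valC_replicate, bitv]
  · simp
  · exact List.getElem?_set_self (by simp)

theorem calc_sum_eq (l : List Int) (hs : l.Pairwise (· ≤ ·)) (hn : ∀ x ∈ l, 0 ≤ x)
    (hc : ∀ y ∈ l, l.count y ≤ 2) : calc_sum l = Ssum l := by
  cases l with
  | nil => rfl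
  | cons x rest =>
    have hx0 : 0 ≤ x := hn x (by simp)
    have hxX : x = (x.toNat : Int) := by omega
    set X := x.toNat with hXdef
    obtain ⟨hv1, hA1⟩ := calcStep_first X
    have hrun : valC (rest.foldl calcStep (calcStep ['0'] (X : Int))) =
        valC (calcStep ['0'] (X : Int)) + Ssum rest := by
      apply calc_run rest X (calcStep ['0'] (X : Int)) ((List.pairwise_cons.mp hs).2)
      · intro z hz
        have := (List.pairwise_cons.mp hs).1 z hz; omega
      · intro y hy
        have h2 := hc y (by simp [hy])
        rw [List.count_cons] at h2; omega
      · exact Or.inl hA1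
      · exact fun _ => Or.inl hA1
      · have h2 := hc x (by simp)
        rw [List.count_cons, if_pos (by simp)] at h2
        rw [← hxX]; omega
    have hlen : 0 < ((x :: rest).foldl calcStep ['0']).length :=
      lt_of_lt_of_le (by decide) (length_foldl_calcStep (x :: rest) ['0'])
    simp only [calc_sum, List.length_cons, gt_iff_lt, Nat.zero_lt_succ, if_true]
    rw [if_pos hlen, conv_foldl]
    simp only [List.foldl_cons] at hrun ⊢
    rw [hxX, hrun, hv1]
    simp only [Ssum, List.map_cons, List.sum_cons, Spow, Int.toNat_natCast]
    ring

-- the invariant carried by each of A's four index lists: nonincreasing, nonnegative,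
-- every value at most twice, and count-dependent lower bounds against the next n
def Wl (nn : Int) (l : List Int) : Prop :=
  l.Pairwise (· ≥ ·) ∧ (∀ y ∈ l, 0 ≤ y) ∧ (∀ y ∈ l, l.count y ≤ 2) ∧
  (∀ y ∈ l, (l.count y = 1 → nn < 2 * y + 1) ∧ (l.count y = 2 → nn < 2 * y))

theorem Wl_nil (nn : Int) : Wl nn [] := by
  refine ⟨List.Pairwise.nil, ?_, ?_, ?_⟩ <;> simp

theorem Wl_mono {nn m : Int} {l : List Int} (h : Wl nn l) (hm : m ≤ nn) : Wl m l := by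
  obtain ⟨h1, h2, h3, h4⟩ := h
  exact ⟨h1, h2, h3, fun y hy => ⟨fun hc => lt_of_le_of_lt hm ((h4 y hy).1 hc),
    fun hc => lt_of_le_of_lt hm ((h4 y hy).2 hc)⟩⟩

theorem Wl_append {nn : Int} {l : List Int} (h : Wl nn l) (hnn : 0 ≤ nn) :
    Wl (nn - 1) (l ++ [PySem.Int.floordiv nn 2]) ∧
    Ssum (l ++ [PySem.Int.floordiv nn 2]) = Ssum l + Spow (PySem.Int.floordiv nn 2) := by
  obtain ⟨h1, h2, h3, h4⟩ := h
  set x := PySem.Int.floordiv nn 2 with hx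
  have hxe : nn = 2 * x ∨ nn = 2 * x + 1 := by
    rw [hx, PySem.Int.floordiv_eq_ediv_of_pos (by norm_num : (0 : Int) < 2)]
    omega
  have hb1 : 2 * x ≤ nn := by rcases hxe with h | h <;> omega
  have hb2 : nn ≤ 2 * x + 1 := by rcases hxe with h | h <;> omega
  have hx0 : 0 ≤ x := by omega
  have hub : ∀ y ∈ l, x ≤ y := by
    intro y hy
    have hcy : 0 < l.count y := List.count_pos_iff.mpr hy
    have hcy2 := h3 y hy
    rcases (by omega : l.count y = 1 ∨ l.count y = 2) with hcc | hcc
    · have := (h4 y hy).1 hcc; omega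
    · have := (h4 y hy).2 hcc; omega
  have hcx : l.count x ≤ 1 := by
    by_contra hgt
    have hmem : x ∈ l := List.count_pos_iff.mp (by omega)
    have hc2 : l.count x = 2 := by have := h3 x hmem; omega
    have := (h4 x hmem).2 hc2; omega
  have hca : ∀ z : Int, List.count z (l ++ [x]) = List.count z l + (if z = x then 1 else 0) := by
    intro z
    simp only [List.count_append, List.count_singleton']
    by_cases hzx : z = x
    · simp [hzx]
    · have hzx' : ¬x = z := fun hh => hzx hh.symm
      simp [hzx, hzx']
  refine ⟨⟨?_, ?_, ?_, ?_⟩, Ssum_append l x⟩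
  · rw [List.pairwise_append]
    refine ⟨h1, List.pairwise_singleton _ _, fun a ha b hb => ?_⟩
    simp only [List.mem_singleton] at hb
    subst hb
    exact hub a ha
  · intro y hy
    rcases List.mem_append.mp hy with hy | hy
    · exact h2 y hy
    · simp only [List.mem_singleton] at hy; subst hy; exact hx0
  · intro y hy
    rw [hca]
    by_cases hyx : y = x
    · subst hyx; simp; omega
    · have hyl : y ∈ l := by
        rcases List.mem_append.mp hy with h | h
        · exact h
        · simp only [List.mem_singleton] at h; exact absurd h hyx
      have := h3 y hyl
      simp only [if_neg hyx]
      omega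
  · intro y hy
    rw [hca]
    by_cases hyx : y = x
    · subst hyx
      rw [if_pos rfl]
      constructor
      · intro hc; omega
      · intro hc
        have hcl : l.count x = 1 := by omega
        have hmem : x ∈ l := List.count_pos_iff.mp (by omega)
        have := (h4 x hmem).1 hcl
        omega
    · have hyl : y ∈ l := by
        rcases List.mem_append.mp hy with h | h
        · exact h
        · simp only [List.mem_singleton] at h; exact absurd h hyx
      simp only [if_neg hyx]
      constructor
      · intro hc
        have := (h4 y hyl).1 (by omega)
        omega
      · intro hc
        have := (h4 y hyl).2 (by omega)
        omega

theorem calc_sum_reverse {l : List Int} (h : Wl (-1) l) : calc_sum l.reverse = Ssum l := by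
  obtain ⟨h1, h2, h3, _⟩ := h
  have := calc_sum_eq l.reverse (by rwa [List.pairwise_reverse])
    (fun x hx => h2 x (List.mem_reverse.mp hx))
    (fun y hy => by rw [List.count_reverse]; exact h3 y (List.mem_reverse.mp hy))
  rw [this]
  simp [Ssum]

-- the paired simulation of A's loop (lists) and B's loop (accumulators)
def SimRel (N : Int) (k1 : Int) (A : Int × Int × Bool × (List Int × List Int) × (List Int × List Int))
    (B : Int × Int × Bool × Int × Int) : Prop :=
  A.1 = B.1 ∧ A.2.1 = B.2.1 ∧ A.2.2.1 = B.2.2.1 ∧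
  (A.1 = 1 ∨ A.1 = -1) ∧ (A.2.1 = 1 ∨ A.2.1 = -1) ∧
  B.2.2.2.1 = Ssum A.2.2.2.1.1 - Ssum A.2.2.2.2.1 ∧
  B.2.2.2.2 = Ssum A.2.2.2.1.2 - Ssum A.2.2.2.2.2 ∧
  Wl (N - k1 - 1) A.2.2.2.1.1 ∧ Wl (N - k1 - 1) A.2.2.2.1.2 ∧
  Wl (N - k1 - 1) A.2.2.2.2.1 ∧ Wl (N - k1 - 1) A.2.2.2.2.2

theorem signed_if (pol t : Int) (c : Prop) [inst : Decidable c] :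
    (if c then -(pol * t) else pol * t) = (if c then pol * -1 else pol) * t := by
  split <;> ring


theorem pos_core (m : Int) (hm : 0 ≤ m - 1) (pol : Int) (hpol : pol = 1 ∨ pol = -1)
    (p0 p1 q0 q1 : List Int) (xa ya : Int)
    (hB1 : xa = Ssum p0 - Ssum q0) (hB2 : ya = Ssum p1 - Ssum q1)
    (hW1 : Wl (m - 1) p0) (hW2 : Wl (m - 1) p1) (hW3 : Wl (m - 1) q0) (hW4 : Wl (m - 1) q1) :
    (let acc :=
      (if PySem.Int.mod (m - 1) 2 = 1 then
        (xa + (if 5 ≤ PySem.Int.mod (m - 1) 8 ∧ PySem.Int.mod (m - 1) 8 ≤ 7 then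
                 -(pol * 2 ^ (PySem.Int.floordiv (m - 1) 2).toNat)
               else pol * 2 ^ (PySem.Int.floordiv (m - 1) 2).toNat),
         ya + (if 3 ≤ PySem.Int.mod (m - 1) 8 ∧ PySem.Int.mod (m - 1) 8 ≤ 5 then
                 -(pol * 2 ^ (PySem.Int.floordiv (m - 1) 2).toNat)
               else pol * 2 ^ (PySem.Int.floordiv (m - 1) 2).toNat))
      else if PySem.Int.mod (m - 1) 4 = 0 then
        (xa, ya + (if 3 ≤ PySem.Int.mod (m - 1) 8 ∧ PySem.Int.mod (m - 1) 8 ≤ 5 then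
                 -(pol * 2 ^ (PySem.Int.floordiv (m - 1) 2).toNat)
               else pol * 2 ^ (PySem.Int.floordiv (m - 1) 2).toNat))
      else
        (xa + (if 5 ≤ PySem.Int.mod (m - 1) 8 ∧ PySem.Int.mod (m - 1) 8 ≤ 7 then
                 -(pol * 2 ^ (PySem.Int.floordiv (m - 1) 2).toNat)
               else pol * 2 ^ (PySem.Int.floordiv (m - 1) 2).toNat), ya))
     let pn := find_n m (p0, p1) (q0, q1) pol
     acc.1 = Ssum pn.1.1 - Ssum pn.2.1 ∧ acc.2 = Ssum pn.1.2 - Ssum pn.2.2 ∧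
     Wl (m - 2) pn.1.1 ∧ Wl (m - 2) pn.1.2 ∧ Wl (m - 2) pn.2.1 ∧ Wl (m - 2) pn.2.2) := by
  dsimp only [find_n]
  rw [signed_if pol _ (5 ≤ PySem.Int.mod (m - 1) 8 ∧ PySem.Int.mod (m - 1) 8 ≤ 7),
      signed_if pol _ (3 ≤ PySem.Int.mod (m - 1) 8 ∧ PySem.Int.mod (m - 1) 8 ≤ 5)]
  set nn := m - 1 with hnn
  set x := PySem.Int.floordiv nn 2 with hx
  set xp := (if 5 ≤ PySem.Int.mod nn 8 ∧ PySem.Int.mod nn 8 ≤ 7 then pol * -1 else pol) with hxp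
  set yp := (if 3 ≤ PySem.Int.mod nn 8 ∧ PySem.Int.mod nn 8 ≤ 5 then pol * -1 else pol) with hyp
  have hxps : xp = 1 ∨ xp = -1 := by
    rw [hxp]; rcases hpol with h | h <;> subst h <;> split <;> norm_num
  have hyps : yp = 1 ∨ yp = -1 := by
    rw [hyp]; rcases hpol with h | h <;> subst h <;> split <;> norm_num
  have hSx : xp * 2 ^ x.toNat = xp * Spow x := rfl
  have hW1' := Wl_append hW1 hm
  have hW2' := Wl_append hW2 hm
  have hW3' := Wl_append hW3 hm
  have hW4' := Wl_append hW4 hm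
  have hp2 : m - 2 = nn - 1 := by omega
  rw [hp2]
  simp only [Spow] at hW1' hW2' hW3' hW4'
  by_cases h2 : PySem.Int.mod nn 2 = 1
  · rw [if_pos h2, if_pos h2]
    rcases hxps with hx1 | hx1 <;> rcases hyps with hy1 | hy1 <;>
      rw [hx1, hy1] <;>
      (try simp only [reduceIte, show ((-1:Int) = 1) ↔ False from by norm_num, if_false]) <;>
      refine ⟨?_, ?_, ?_, ?_, ?_, ?_⟩ <;>
      first
        | (rw [hB1, hW1'.2]; ring) | (rw [hB1, hW3'.2]; ring)
        | (rw [hB2, hW2'.2]; ring) | (rw [hB2, hW4'.2]; ring)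
        | exact hW1'.1 | exact hW2'.1 | exact hW3'.1 | exact hW4'.1
        | exact Wl_mono hW1 (by omega) | exact Wl_mono hW2 (by omega)
        | exact Wl_mono hW3 (by omega) | exact Wl_mono hW4 (by omega)
  · rw [if_neg h2, if_neg h2]
    by_cases h4 : PySem.Int.mod nn 4 = 0
    · rw [if_pos h4, if_pos h4]
      rcases hyps with hy1 | hy1 <;>
        rw [hy1] <;>
        (try simp only [reduceIte, show ((-1:Int) = 1) ↔ False from by norm_num, if_false]) <;>
        refine ⟨?_, ?_, ?_, ?_, ?_, ?_⟩ <;>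
        first
          | exact hB1
          | (rw [hB2, hW2'.2]; ring) | (rw [hB2, hW4'.2]; ring)
          | exact hW2'.1 | exact hW4'.1
          | exact Wl_mono hW1 (by omega) | exact Wl_mono hW2 (by omega)
          | exact Wl_mono hW3 (by omega) | exact Wl_mono hW4 (by omega)
    · have h0 : PySem.Int.mod nn 2 = 0 := by
        have ha := PySem.Int.mod_nonneg nn (by norm_num : (0 : Int) < 2)
        have hb := PySem.Int.mod_lt nn (by norm_num : (0 : Int) < 2)
        omega
      rw [if_neg h4, if_neg h4, if_pos h0]
      rcases hxps with hx1 | hx1 <;>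
        rw [hx1] <;>
        (try simp only [reduceIte, show ((-1:Int) = 1) ↔ False from by norm_num, if_false]) <;>
        refine ⟨?_, ?_, ?_, ?_, ?_, ?_⟩ <;>
        first
          | exact hB2
          | (rw [hB1, hW1'.2]; ring) | (rw [hB1, hW3'.2]; ring)
          | exact hW1'.1 | exact hW3'.1
          | exact Wl_mono hW1 (by omega) | exact Wl_mono hW2 (by omega)
          | exact Wl_mono hW3 (by omega) | exact Wl_mono hW4 (by omega)

theorem step_sim (cs : List Char) (k : Nat) (hk : k < cs.length)
    (A : Int × Int × Bool × (List Int × List Int) × (List Int × List Int))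
    (B : Int × Int × Bool × Int × Int)
    (h : SimRel (cs.length : Int) (k : Int) A B) :
    SimRel (cs.length : Int) ((k : Int) + 1)
      (stepA cs (cs.length : Int) A (k : Int))
      (stepB cs (cs.length : Int) B ((k : Int), PySem.List.pyGetD cs (k : Int) ' ')) := by
  obtain ⟨ca, bb, ff, ⟨p0, p1⟩, q0, q1⟩ := A
  obtain ⟨ca', bb', ff', xa, ya⟩ := B
  obtain ⟨e1, e2, e3, hs1, hs2, hB1, hB2, hW1, hW2, hW3, hW4⟩ := h
  dsimp only at e1 e2 e3 hs1 hs2 hB1 hB2 hW1 hW2 hW3 hW4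
  subst e1; subst e2; subst e3
  have hkN : (k : Int) < (cs.length : Int) := by exact_mod_cast hk
  have hparam : (cs.length : Int) - ((k : Int) + 1) - 1 = (cs.length : Int) - (k : Int) - 1 - 1 := by ring
  by_cases hch : PySem.List.pyGetD cs (k : Int) ' ' = '1'
  · dsimp only [stepA, stepB]
    rw [if_pos hch, if_pos hch]
    have hm1 : 0 ≤ ((cs.length : Int) - (k : Int)) - 1 := by omega
    have hpar2 : (cs.length : Int) - ((k : Int) + 1) - 1 = ((cs.length : Int) - (k : Int)) - 2 := by ring
    by_cases hc2 : (0 < (k : Int) ∧ PySem.List.pyGetD cs ((k : Int) - 1) ' ' = '0')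
    · rw [if_pos hc2, if_pos hc2]
      rw [show ca * -1 = -ca from by ring]
      have hpc := pos_core ((cs.length : Int) - (k : Int)) hm1 ((-ca) * 1)
        (by rcases hs1 with h | h <;> subst h <;> norm_num) p0 p1 q0 q1 xa ya
        (by rw [hB1]) (by rw [hB2]) hW1 hW2 hW3 hW4
      dsimp only at hpc ⊢
      refine ⟨rfl, rfl, rfl, ?_, ?_, ?_, ?_, ?_, ?_, ?_, ?_⟩
      · rcases hs1 with h | h <;> subst h <;> norm_num
      · by_cases hk0 : (k : Int) = 0 <;> simp [hk0]
      · exact hpc.1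
      · exact hpc.2.1
      · rw [hpar2]; exact hpc.2.2.1
      · rw [hpar2]; exact hpc.2.2.2.1
      · rw [hpar2]; exact hpc.2.2.2.2.1
      · rw [hpar2]; exact hpc.2.2.2.2.2
    · rw [if_neg hc2, if_neg hc2]
      have hpc := pos_core ((cs.length : Int) - (k : Int)) hm1 (ca * bb)
        (by rcases hs1 with h | h <;> rcases hs2 with h2 | h2 <;> subst h <;> subst h2 <;> norm_num)
        p0 p1 q0 q1 xa ya (by rw [hB1]) (by rw [hB2]) hW1 hW2 hW3 hW4
      dsimp only at hpc ⊢
      refine ⟨rfl, rfl, rfl, ?_, ?_, ?_, ?_, ?_, ?_, ?_, ?_⟩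
      · exact hs1
      · by_cases hk0 : (k : Int) = 0 <;> by_cases hff : ff = true <;>
          simp only [hk0, hff, if_true, if_false] <;>
          first | exact hs2 | norm_num
      · exact hpc.1
      · exact hpc.2.1
      · rw [hpar2]; exact hpc.2.2.1
      · rw [hpar2]; exact hpc.2.2.2.1
      · rw [hpar2]; exact hpc.2.2.2.2.1
      · rw [hpar2]; exact hpc.2.2.2.2.2
  · dsimp only [stepA, stepB]
    rw [if_neg hch, if_neg hch]
    exact ⟨rfl, rfl, rfl, hs1, hs2, hB1, hB2,
      by rw [hparam]; exact Wl_mono hW1 (by omega),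
      by rw [hparam]; exact Wl_mono hW2 (by omega),
      by rw [hparam]; exact Wl_mono hW3 (by omega),
      by rw [hparam]; exact Wl_mono hW4 (by omega)⟩

theorem loop_sim (cs : List Char) : ∀ k : Nat, k ≤ cs.length →
    SimRel (cs.length : Int) (k : Int)
      ((PySem.List.pyRange 0 (k : Int) 1).foldl (stepA cs (cs.length : Int))
        (1, 1, false, ([], []), ([], [])))
      ((PySem.List.pyRange 0 (k : Int) 1).foldl
        (fun st j => stepB cs (cs.length : Int) st (j, PySem.List.pyGetD cs j ' '))
        (1, 1, false, 0, 0)) := by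
  intro k
  induction k with
  | zero =>
    intro _
    rw [PySem.List.pyRange_one_eq_nil (by norm_num)]
    exact ⟨rfl, rfl, rfl, Or.inl rfl, Or.inl rfl, by simp [Ssum], by simp [Ssum],
      Wl_nil _, Wl_nil _, Wl_nil _, Wl_nil _⟩
  | succ k ih =>
    intro hk1
    have hk : k < cs.length := by omega
    have hsplit : PySem.List.pyRange 0 ((k + 1 : Nat) : Int) 1
        = PySem.List.pyRange 0 (k : Int) 1 ++ [(k : Int)] := by
      push_cast
      exact PySem.List.pyRange_one_succ_right (by positivity)
    rw [hsplit, List.foldl_append, List.foldl_append]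
    simp only [List.foldl_cons, List.foldl_nil]
    have hcast : (((k + 1 : Nat)) : Int) = (k : Int) + 1 := by omega
    rw [hcast]
    exact step_sim cs k hk _ _ (ih (by omega))

theorem get_pos_eq_alt (bin_m : String) : get_pos bin_m = get_pos_alt bin_m := by
  have hlen : PySem.Str.len bin_m = (bin_m.toList.length : Int) := by
    simp [PySem.Str.len_eq, String.length_toList]
  simp only [get_pos, get_pos_alt, hlen]
  set cs := bin_m.toList with hcs
  rw [PySem.List.enumerate_eq_map_pyRange cs ' ', List.foldl_map]
  have hlen2 : PySem.List.len cs = (cs.length : Int) := by simp [PySem.List.len_eq]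
  rw [hlen2]
  obtain ⟨e1, e2, e3, _, _, hB1, hB2, hW1, hW2, hW3, hW4⟩ := loop_sim cs cs.length (le_refl _)
  have hm1 : (cs.length : Int) - (cs.length : Nat) - 1 = -1 := by ring
  rw [hm1] at hW1 hW2 hW3 hW4
  unfold calc_final_pos
  dsimp only
  rw [calc_sum_reverse hW1, calc_sum_reverse hW2, calc_sum_reverse hW3, calc_sum_reverse hW4,
    ← hB1, ← hB2]

-- ===== VERDICT (by name: the statement is the Claim_ definition above) =====
theorem get_pos_spec : Claim_equal_get_pos := by
  intro bin_m _
  exact get_pos_eq_alt bin_m
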